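-- pv_equiv track=rewrite | github.com/BeAllAround/FreeStyle | Codewars/Pair Zeros.py | pair_zeros
-- ===== SOURCE A (Python) =====
-- def pair_zeros(arr):
--     _arr, inxs, c = [], [], 1;
--     c_inx = [];
--
--     for x in range(len(arr)):
--         if(arr[x] == 0):
--             inxs.append(x);
--             if c == 2:
--                 inxs.pop(0);
--                 c_inx.extend([*inxs]);
--                 inxs = [];
--                 c = 1;
--                 continue;
--             c += 1;
--
--     for x in range(len(arr)):
--         if x not in c_inx:
--             _arr.append(arr[x]);
--     return _arr;
-- ===== SOURCE B (Python) =====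
-- def pair_zeros(arr):
--     # One pass with a parity flag: keep every element except
--     # the second zero of each consecutive-counted pair of zeros.
--     out = []
--     pending = False
--     for v in arr:
--         if v == 0:
--             if pending:
--                 pending = False  # drop the second zero of the pair
--             else:
--                 pending = True
--                 out.append(v)
--         else:
--             out.append(v)
--     return out
-- ===== Notes on version B (the rewrite author's own statement) =====
-- stated objective: alternative
-- what changed: Replaced the two-pass index-collecting algorithm (build a list c_inx of the indices of every second zero, then refilter the whole array with a linear 'x in c_inx' membership scan per element) by a single pass over the values with a boolean parity flag, appending kept elements directly.
import Mathlib
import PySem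

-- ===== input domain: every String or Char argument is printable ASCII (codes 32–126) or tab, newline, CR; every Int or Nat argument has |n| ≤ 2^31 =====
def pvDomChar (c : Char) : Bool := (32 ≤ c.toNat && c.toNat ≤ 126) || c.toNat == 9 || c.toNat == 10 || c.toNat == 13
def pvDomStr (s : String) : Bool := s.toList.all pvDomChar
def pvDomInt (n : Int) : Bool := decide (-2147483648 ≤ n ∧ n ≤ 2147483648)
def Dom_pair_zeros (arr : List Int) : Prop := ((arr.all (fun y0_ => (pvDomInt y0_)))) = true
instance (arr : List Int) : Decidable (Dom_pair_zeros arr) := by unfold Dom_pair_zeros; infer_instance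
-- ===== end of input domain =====

-- B replaces A's two passes (collect the indices of every second zero, then refilter the
-- whole array with a per-element membership scan) by one pass with a boolean parity flag.

-- ===== PORT A =====
-- step of A's first loop; state (inxs, c, c_inx)
def pzStep1 (arr : List Int) (st : List Int × Int × List Int) (x : Int) :
    List Int × Int × List Int :=
  if PySem.List.pyGetD arr x 0 = 0 then
    let inxs := st.1 ++ [x]
    if st.2.1 = 2 then
      ([], 1, st.2.2 ++ inxs.tail)
    else
      (inxs, st.2.1 + 1, st.2.2)
  else st

def pair_zeros (arr : List Int) : List Int :=
  let st := (PySem.List.pyRange 0 (arr.length : Int) 1).foldl (pzStep1 arr) ([], 1, [])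
  (PySem.List.pyRange 0 (arr.length : Int) 1).foldl
    (fun acc x => if x ∈ st.2.2 then acc else acc ++ [PySem.List.pyGetD arr x 0]) []

-- ===== PORT B =====
-- step of B's single loop; state (out, pending)
def pzStepB (st : List Int × Bool) (v : Int) : List Int × Bool :=
  if v = 0 then
    if st.2 then (st.1, false) else (st.1 ++ [v], true)
  else (st.1 ++ [v], st.2)

def pair_zeros_alt (arr : List Int) : List Int :=
  (arr.foldl pzStepB ([], false)).1

-- ===== PRECONDITION & SPEC =====
def Spec_pair_zeros (arr : List Int) (out : List Int) : Prop := out = pair_zeros_alt arr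
instance (arr : List Int) (out : List Int) : Decidable (Spec_pair_zeros arr out) := by unfold Spec_pair_zeros; infer_instance

-- ===== CLAIM (what is proved, stated in full; the proofs are below) =====
def Claim_equal_pair_zeros : Prop := ∀ (arr : List Int), Dom_pair_zeros arr → Spec_pair_zeros arr (pair_zeros arr)

-- ===== LEMMAS AND PROOFS =====
lemma pyGetD_append_lt (ys : List Int) (v x : Int) (h0 : 0 ≤ x) (h1 : x < (ys.length : Int)) :
    PySem.List.pyGetD (ys ++ [v]) x 0 = PySem.List.pyGetD ys x 0 := by
  rw [PySem.List.pyGetD_eq_getElem _ 0 h0 (by simp; omega),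
      PySem.List.pyGetD_eq_getElem _ 0 h0 (by omega)]
  rw [List.getElem_append_left (by omega)]

lemma pyGetD_append_len (ys : List Int) (v : Int) :
    PySem.List.pyGetD (ys ++ [v]) (ys.length : Int) 0 = v := by
  rw [PySem.List.pyGetD_eq_getElem _ 0 (by positivity) (by simp)]
  simp

-- A's first-loop and second-loop folds as functions of the array
def pzFold1 (arr : List Int) : List Int × Int × List Int :=
  (PySem.List.pyRange 0 (arr.length : Int) 1).foldl (pzStep1 arr) ([], 1, [])

lemma fold1_snoc (ys : List Int) (v : Int) :
    pzFold1 (ys ++ [v]) = pzStep1 (ys ++ [v]) (pzFold1 ys) (ys.length : Int) := by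
  unfold pzFold1
  have hlen : (((ys ++ [v]).length : Int)) = (ys.length : Int) + 1 := by simp
  rw [hlen, PySem.List.pyRange_one_succ_right (by positivity), List.foldl_append]
  simp only [List.foldl_cons, List.foldl_nil]
  congr 1
  apply PySem.List.foldl_congr_mem
  intro acc x hx
  rw [PySem.List.mem_pyRange_one] at hx
  unfold pzStep1
  rw [pyGetD_append_lt ys v x hx.1 hx.2]

def pzFold2 (arr : List Int) (cinx : List Int) : List Int :=
  (PySem.List.pyRange 0 (arr.length : Int) 1).foldl
    (fun acc x => if x ∈ cinx then acc else acc ++ [PySem.List.pyGetD arr x 0]) []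

lemma fold2_snoc (ys : List Int) (v : Int) (cinx : List Int) :
    pzFold2 (ys ++ [v]) cinx =
      if (ys.length : Int) ∈ cinx then pzFold2 ys cinx else pzFold2 ys cinx ++ [v] := by
  unfold pzFold2
  have hlen : (((ys ++ [v]).length : Int)) = (ys.length : Int) + 1 := by simp
  rw [hlen, PySem.List.pyRange_one_succ_right (by positivity), List.foldl_append]
  have hco : List.foldl (fun acc x => if x ∈ cinx then acc
                else acc ++ [PySem.List.pyGetD (ys ++ [v]) x 0]) []
              (PySem.List.pyRange 0 (ys.length : Int)) =
      List.foldl (fun acc x => if x ∈ cinx then acc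
                else acc ++ [PySem.List.pyGetD ys x 0]) []
              (PySem.List.pyRange 0 (ys.length : Int)) := by
    apply PySem.List.foldl_congr_mem
    intro acc x hx
    rw [PySem.List.mem_pyRange_one] at hx
    rw [pyGetD_append_lt ys v x hx.1 hx.2]
  rw [hco]
  simp only [List.foldl_cons, List.foldl_nil, pyGetD_append_len]

lemma fold2_congr (ys : List Int) (cinx cinx' : List Int)
    (h : ∀ x : Int, 0 ≤ x → x < (ys.length : Int) → (x ∈ cinx ↔ x ∈ cinx')) :
    pzFold2 ys cinx = pzFold2 ys cinx' := by
  unfold pzFold2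
  apply PySem.List.foldl_congr_mem
  intro acc x hx
  rw [PySem.List.mem_pyRange_one] at hx
  rw [if_congr (h x hx.1 hx.2) rfl rfl]

-- the joint invariant: A's c_inx indices are in range, A's (inxs, c) state matches B's
-- parity flag, and A's second loop applied to the current c_inx yields B's output
def pzInv (arr : List Int) : Prop :=
  let stA := pzFold1 arr
  let stB := arr.foldl pzStepB ([], false)
  (∀ x ∈ stA.2.2, 0 ≤ x ∧ x < (arr.length : Int)) ∧
  (if stB.2 then stA.2.1 = 2 ∧ ∃ j, stA.1 = [j] else stA.2.1 = 1 ∧ stA.1 = []) ∧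
  pzFold2 arr stA.2.2 = stB.1

lemma step1_zero (arr : List Int) (x : Int) (inxs : List Int) (c : Int) (cinx : List Int)
    (h : PySem.List.pyGetD arr x 0 = 0) :
    pzStep1 arr (inxs, c, cinx) x =
      if c = 2 then ([], 1, cinx ++ (inxs ++ [x]).tail) else (inxs ++ [x], c + 1, cinx) := by
  simp [pzStep1, h]

lemma step1_nonzero (arr : List Int) (x : Int) (st : List Int × Int × List Int)
    (h : PySem.List.pyGetD arr x 0 ≠ 0) : pzStep1 arr st x = st := by
  simp [pzStep1, h]

theorem pair_zeros_inv (arr : List Int) : pzInv arr := by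
  induction arr using List.reverseRecOn with
  | nil =>
      unfold pzInv pzFold1 pzFold2
      simp [PySem.List.pyRange]
  | append_singleton ys v ih =>
      unfold pzInv at ih ⊢
      rcases hA : pzFold1 ys with ⟨inxs, c, cinx⟩
      rcases hB : List.foldl pzStepB ([], false) ys with ⟨out, pending⟩
      rw [hA, hB] at ih
      obtain ⟨hbnd, hst, hout⟩ := ih
      simp only at hbnd hst hout
      have hnotmem : (ys.length : Int) ∉ cinx := fun hm => by
        have := (hbnd _ hm).2; omega
      have hlen : (((ys ++ [v]).length : Int)) = (ys.length : Int) + 1 := by simp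
      rw [fold1_snoc, List.foldl_append, List.foldl_cons, List.foldl_nil, hA, hB, hlen]
      by_cases hv : v = 0
      · subst hv
        have hg : PySem.List.pyGetD (ys ++ [0]) (ys.length : Int) 0 = 0 :=
          pyGetD_append_len ys 0
        rw [step1_zero _ _ _ _ _ hg]
        cases hpend : pending with
        | false =>
            rw [hpend] at hst
            simp only [if_neg (Bool.false_ne_true)] at hst
            obtain ⟨hc1, hinxs⟩ := hst
            rw [if_neg (by rw [hc1]; decide), hinxs]
            refine ⟨?_, ?_, ?_⟩
            · intro x hx
              simp only at hx
              have := hbnd x hx; exact ⟨this.1, by omega⟩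
            · simp [pzStepB, hc1]
            · rw [fold2_snoc, if_neg hnotmem, hout]
              simp [pzStepB]
        | true =>
            rw [hpend] at hst
            rw [if_pos rfl] at hst
            obtain ⟨hc2, j, hj⟩ := hst
            rw [hj, if_pos hc2]
            simp only [List.cons_append, List.nil_append, List.tail_cons]
            refine ⟨?_, ?_, ?_⟩
            · intro x hx
              rw [List.mem_append] at hx
              rcases hx with h | h
              · have := hbnd x h; exact ⟨this.1, by omega⟩
              · rw [List.mem_singleton] at h; subst h
                exact ⟨by positivity, by omega⟩
            · simp [pzStepB]
            · rw [fold2_snoc, if_pos (by simp),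
                  fold2_congr ys (cinx ++ [(ys.length : Int)]) cinx (by
                    intro x h0 hltx
                    simp only [List.mem_append, List.mem_singleton]
                    constructor
                    · rintro (h | h)
                      · exact h
                      · omega
                    · intro h; exact Or.inl h),
                  hout]
              simp [pzStepB]
      · have hg : PySem.List.pyGetD (ys ++ [v]) (ys.length : Int) 0 ≠ 0 := by
          rw [pyGetD_append_len]; exact hv
        rw [step1_nonzero _ _ _ hg]
        refine ⟨?_, ?_, ?_⟩
        · intro x hx
          simp only at hx
          have := hbnd x hx; exact ⟨this.1, by omega⟩
        · simp only [pzStepB, if_neg hv]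
          exact hst
        · simp only [pzStepB, if_neg hv]
          rw [fold2_snoc, if_neg hnotmem, hout]

-- ===== VERDICT (by name: the statement is the Claim_ definition above) =====
theorem pair_zeros_spec : Claim_equal_pair_zeros := by
  intro arr _
  have h := pair_zeros_inv arr
  unfold pzInv at h
  exact h.2.2
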